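-- pv_equiv track=rewrite | github.com/imehtn/TIP_102 | Unit2/sess1/v1_standardproblems.py | max_audience_performaces
-- ===== SOURCE A (Python) =====
-- def max_audience_performaces(audiences):
--     if not audiences:
--         return 0
--
--     # Step 1: Find the maximum audience size
--     max_audience = max(audiences)
--     size_map = {}
--
--     # Step 2: Count occurrences of each audience size
--     for audience in audiences:
--         if audience in size_map:
--             size_map[audience] += 1
--         else:
--             size_map[audience] = 1
--
--     # Step 3: Calculate combined audience size for performances with max audience size
--     return size_map[max_audience] * max_audience
-- ===== SOURCE B (Python) =====
-- def max_audience_performaces(audiences):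
--     # Single pass keeping only the running maximum and its running count.
--     if not audiences:
--         return 0
--     cur_max = audiences[0]
--     cur_count = 1
--     for a in audiences[1:]:
--         if a > cur_max:
--             cur_max, cur_count = a, 1
--         elif a == cur_max:
--             cur_count += 1
--     return cur_max * cur_count
-- ===== Notes on version B (the rewrite author's own statement) =====
-- stated objective: faster
-- what changed: Replaced the max() pass plus a frequency dictionary over the whole list with one pass that maintains only the running maximum and its count (two scalars, no dict).
import Mathlib
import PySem

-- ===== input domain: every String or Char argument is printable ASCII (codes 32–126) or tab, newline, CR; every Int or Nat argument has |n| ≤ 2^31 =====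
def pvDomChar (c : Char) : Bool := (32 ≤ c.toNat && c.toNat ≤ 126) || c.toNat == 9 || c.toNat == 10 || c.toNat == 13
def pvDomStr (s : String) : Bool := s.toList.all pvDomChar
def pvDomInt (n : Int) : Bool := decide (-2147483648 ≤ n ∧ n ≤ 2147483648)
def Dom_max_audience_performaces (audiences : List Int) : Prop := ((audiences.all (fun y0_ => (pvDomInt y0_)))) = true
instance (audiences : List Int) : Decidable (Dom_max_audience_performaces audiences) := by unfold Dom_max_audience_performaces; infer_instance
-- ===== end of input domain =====

-- B replaces A's max() pass + frequency dictionary with one pass keeping only the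
-- running maximum and its count (objective: faster by a constant factor, O(1) space).


-- ===== PORT A =====
def max_audience_performaces (audiences : List Int) : Int :=
  if audiences = [] then 0
  else
    match PySem.List.max? audiences (fun x => x) with
    | none => 0  -- unreachable: audiences ≠ []
    | some max_audience =>
      let size_map := audiences.foldl
        (fun d a => if d.contains a then d.insert a (d.getD a 0 + 1) else d.insert a 1)
        PySem.Dict.empty
      -- size_map[max_audience]: the key is always present (max comes from the list)
      size_map.getD max_audience 0 * max_audience

-- ===== PORT B =====
def max_audience_performaces_alt (audiences : List Int) : Int :=
  match audiences with
  | [] => 0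
  | h :: t =>
    let p := t.foldl
      (fun (p : Int × Int) a =>
        if a > p.1 then (a, 1) else if a = p.1 then (p.1, p.2 + 1) else p)
      (h, 1)
    p.1 * p.2

-- ===== PRECONDITION & SPEC =====
def Spec_max_audience_performaces (audiences : List Int) (out : Int) : Prop := out = max_audience_performaces_alt audiences
instance (audiences : List Int) (out : Int) : Decidable (Spec_max_audience_performaces audiences out) := by unfold Spec_max_audience_performaces; infer_instance

-- ===== CLAIM (what is proved, stated in full; the proofs are below) =====
def Claim_equal_max_audience_performaces : Prop := ∀ (audiences : List Int), Dom_max_audience_performaces audiences → Spec_max_audience_performaces audiences (max_audience_performaces audiences)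

-- ===== LEMMAS AND PROOFS =====

-- A's counting loop builds exactly Counter(audiences).
theorem pv_count_loop_eq_counter (xs : List Int) (d : PySem.Dict Int Int) :
    xs.foldl
      (fun d a => if d.contains a then d.insert a (d.getD a 0 + 1) else d.insert a 1)
      d
    = xs.foldl (fun d a => d.insert a (d.getD a 0 + 1)) d := by
  induction xs generalizing d with
  | nil => rfl
  | cons a t ih =>
    simp only [List.foldl]
    by_cases h : d.contains a
    · rw [if_pos h]; exact ih _
    · rw [if_neg h]
      have h0 : d.getD a 0 = 0 := PySem.Dict.getD_of_not_contains _ _ (by simpa using h)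
      rw [h0]
      exact ih _

-- B's loop invariant: it carries the running max and the count of that max.
theorem pv_alt_loop (t : List Int) (m : Int) (c : Int) :
    t.foldl
      (fun (p : Int × Int) a =>
        if a > p.1 then (a, 1) else if a = p.1 then (p.1, p.2 + 1) else p)
      (m, c)
    = (t.foldl max m,
       (t.count (t.foldl max m) : Int) + if m = t.foldl max m then c else 0) := by
  induction t generalizing m c with
  | nil => simp
  | cons a t ih =>
    simp only [List.foldl]
    by_cases h1 : a > m
    · rw [if_pos h1, ih]
      have hmax : max m a = a := by omega
      simp only [hmax]
      have hM : a ≤ t.foldl max a := (PySem.List.le_foldl_max t a).1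
      simp only [List.count_cons, beq_iff_eq, Prod.mk.injEq, true_and]
      push_cast
      split_ifs <;> omega
    · rw [if_neg h1]
      by_cases h2 : a = m
      · subst h2
        rw [if_pos rfl, ih]
        simp only [max_self, List.count_cons, beq_iff_eq, Prod.mk.injEq, true_and]
        push_cast
        split_ifs <;> omega
      · rw [if_neg h2, ih]
        have hmax : max m a = m := by omega
        simp only [hmax]
        have hM : m ≤ t.foldl max m := (PySem.List.le_foldl_max t m).1
        simp only [List.count_cons, beq_iff_eq, Prod.mk.injEq, true_and]
        push_cast
        split_ifs <;> omega

-- ===== VERDICT (by name: the statement is the Claim_ definition above) =====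
theorem max_audience_performaces_spec : Claim_equal_max_audience_performaces := by
  intro audiences _
  unfold Spec_max_audience_performaces max_audience_performaces max_audience_performaces_alt
  cases audiences with
  | nil => rfl
  | cons h t =>
    rw [if_neg (by simp : ¬ ((h :: t : List Int) = []))]
    rw [PySem.List.max?_id_cons, pv_count_loop_eq_counter,
        PySem.Dict.foldl_insert_getD_add_one_eq_counter]
    dsimp only
    rw [PySem.Dict.getD_counter, pv_alt_loop]
    have hM : h ≤ t.foldl max h := (PySem.List.le_foldl_max t h).1
    simp only [List.count_cons, beq_iff_eq]
    push_cast
    split_ifs <;> ring
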